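-- pv_equiv track=rewrite | github.com/okanasik/geometric_pytorch | rescue/dataset/data_adapter.py | create_index_lookup
-- ===== SOURCE A (Python) =====
-- def create_index_lookup(metadata):
--     current_count = 0
--     index_to_filename = {}
--     index_to_inner_index = {}
--     for i, filename in enumerate(sorted(metadata.keys())):
--         for idx in range(current_count, current_count + metadata[filename]["num_graph"]):
--             index_to_filename[idx] = filename
--             index_to_inner_index[idx] = idx - current_count
--         current_count += metadata[filename]["num_graph"]
--     return index_to_filename, index_to_inner_index, current_count
-- ===== SOURCE B (Python) =====
-- def create_index_lookup(metadata):
--     def go(files, start):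
--         if not files:
--             return [], [], start
--         f = files[0]
--         n = metadata[f]["num_graph"]
--         names, inners, total = go(files[1:], start + n)
--         return ([(start + i, f) for i in range(n)] + names,
--                 [(start + i, i) for i in range(n)] + inners,
--                 total)
--     names, inners, total = go(sorted(metadata), 0)
--     return dict(names), dict(inners), total
-- ===== Notes on version B (the rewrite author's own statement) =====
-- stated objective: alternative
-- what changed: Replaces A's iterative nested loops that write into two dicts while mutating a running current_count with a recursion over the sorted file list that returns flat (index, value) pair lists (inner indices produced directly by range(n), no idx - current_count subtraction) plus the threaded total, the two dicts being built once at the end by dict(...).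
import Mathlib
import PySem

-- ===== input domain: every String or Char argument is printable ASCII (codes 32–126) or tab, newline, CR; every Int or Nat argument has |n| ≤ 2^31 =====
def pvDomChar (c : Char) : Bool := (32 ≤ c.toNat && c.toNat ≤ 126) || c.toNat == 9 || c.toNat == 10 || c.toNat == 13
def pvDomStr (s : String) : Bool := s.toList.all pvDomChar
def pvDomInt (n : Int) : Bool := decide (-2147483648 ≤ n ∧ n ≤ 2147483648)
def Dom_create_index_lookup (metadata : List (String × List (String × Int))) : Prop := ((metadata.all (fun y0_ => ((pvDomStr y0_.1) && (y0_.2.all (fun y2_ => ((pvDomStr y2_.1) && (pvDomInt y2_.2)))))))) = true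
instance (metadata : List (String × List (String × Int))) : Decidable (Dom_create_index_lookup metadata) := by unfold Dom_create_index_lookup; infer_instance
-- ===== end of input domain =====

-- B replaces A's iterative nested loops that mutate two dicts and a running counter by a
-- recursion over the sorted file list that returns flat (index, value) pair lists — inner
-- indices produced directly, no idx - current_count subtraction — with both dicts built once
-- at the end by dict(...); same cost, same values.

-- ===== PORT A =====
-- metadata[f]["num_graph"] as a total helper; Pre_ excludes the KeyError case
def pvNumGraph (metadata : List (String × List (String × Int))) (f : String) : Int :=
  (PySem.Dict.ofList ((PySem.Dict.ofList metadata).getD f [])).getD "num_graph" 0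

def create_index_lookup (metadata : List (String × List (String × Int))) : (List (Int × String)) × (List (Int × Int)) × Int :=
  let files := PySem.List.sorted (PySem.Dict.ofList metadata).keys (fun x => x)
  let st := files.foldl
    (fun (st : Int × PySem.Dict Int String × PySem.Dict Int Int) filename =>
      let n := pvNumGraph metadata filename
      let inner := (PySem.List.pyRange st.1 (st.1 + n) 1).foldl
        (fun (p : PySem.Dict Int String × PySem.Dict Int Int) idx =>
          (p.1.insert idx filename, p.2.insert idx (idx - st.1)))
        (st.2.1, st.2.2)
      (st.1 + n, inner.1, inner.2))
    (0, PySem.Dict.empty, PySem.Dict.empty)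
  (st.2.1.items, st.2.2.items, st.1)

-- ===== PORT B =====
-- the recursive helper go(files, start) of Source B
def pvGo (metadata : List (String × List (String × Int))) : List String → Int → (List (Int × String)) × (List (Int × Int)) × Int
  | [], start => ([], [], start)
  | f :: fs, start =>
    let n := pvNumGraph metadata f
    let r := pvGo metadata fs (start + n)
    ((PySem.List.pyRange 0 n 1).map (fun i => (start + i, f)) ++ r.1,
     (PySem.List.pyRange 0 n 1).map (fun i => (start + i, i)) ++ r.2.1,
     r.2.2)

def create_index_lookup_alt (metadata : List (String × List (String × Int))) : (List (Int × String)) × (List (Int × Int)) × Int :=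
  let r := pvGo metadata (PySem.List.sorted (PySem.Dict.ofList metadata).keys (fun x => x)) 0
  ((PySem.Dict.ofList r.1).items, (PySem.Dict.ofList r.2.1).items, r.2.2)

-- ===== PRECONDITION & SPEC =====
-- Pre_ excludes exactly the inputs where Python A raises KeyError: some file's inner dict has no "num_graph" key.
def Pre_create_index_lookup (metadata : List (String × List (String × Int))) : Prop :=
  metadata.all (fun p => p.2.any (fun q => q.1 == "num_graph")) = true
instance (metadata : List (String × List (String × Int))) : Decidable (Pre_create_index_lookup metadata) := by unfold Pre_create_index_lookup; infer_instance
def pvWitness_create_index_lookup : (List (String × List (String × Int))) := [("a", [("num_graph", 2)]), ("b", [("num_graph", 0)])]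
def Spec_create_index_lookup (metadata : List (String × List (String × Int))) (out : (List (Int × String)) × (List (Int × Int)) × Int) : Prop := out = create_index_lookup_alt metadata
instance (metadata : List (String × List (String × Int))) (out : (List (Int × String)) × (List (Int × Int)) × Int) : Decidable (Spec_create_index_lookup metadata out) := by unfold Spec_create_index_lookup; infer_instance

-- ===== CLAIM (what is proved, stated in full; the proofs are below) =====
def Claim_equal_create_index_lookup : Prop := ∀ (metadata : List (String × List (String × Int))), Dom_create_index_lookup metadata → Pre_create_index_lookup metadata → Spec_create_index_lookup metadata (create_index_lookup metadata)

-- ===== LEMMAS AND PROOFS =====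

-- A's inner pair fold splits into two independent folds
theorem pv_inner_split (rng : List Int) (f : String) (c : Int)
    (d1 : PySem.Dict Int String) (d2 : PySem.Dict Int Int) :
    rng.foldl (fun p idx => (p.1.insert idx f, p.2.insert idx (idx - c))) (d1, d2)
      = (rng.foldl (fun d idx => d.insert idx f) d1,
         rng.foldl (fun d idx => d.insert idx (idx - c)) d2) := by
  induction rng generalizing d1 d2 with
  | nil => rfl
  | cons x xs ih => simp [List.foldl, ih]

-- inserting B's pair block for one file is A's inner loop on the filename dict
theorem pv_seg1_fold (f : String) (c n : Int) (d1 : PySem.Dict Int String) :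
    ((PySem.List.pyRange 0 n 1).map (fun i => (c + i, f))).foldl
        (fun d p => d.insert p.1 p.2) d1
      = (PySem.List.pyRange c (c + n) 1).foldl (fun d idx => d.insert idx f) d1 := by
  rw [PySem.List.pyRange_one 0 n, PySem.List.pyRange_one c (c + n)]
  simp [List.foldl_map]

-- … and on the inner-index dict
theorem pv_seg2_fold (c n : Int) (d2 : PySem.Dict Int Int) :
    ((PySem.List.pyRange 0 n 1).map (fun i => (c + i, i))).foldl
        (fun d p => d.insert p.1 p.2) d2
      = (PySem.List.pyRange c (c + n) 1).foldl (fun d idx => d.insert idx (idx - c)) d2 := by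
  rw [PySem.List.pyRange_one 0 n, PySem.List.pyRange_one c (c + n)]
  simp [List.foldl_map]

-- A's loop, characterised by B's recursion: its state after processing fs from (c, d1, d2)
theorem pv_loop (metadata : List (String × List (String × Int))) (fs : List String) (c : Int)
    (d1 : PySem.Dict Int String) (d2 : PySem.Dict Int Int) :
    fs.foldl
      (fun (st : Int × PySem.Dict Int String × PySem.Dict Int Int) filename =>
        let n := pvNumGraph metadata filename
        let inner := (PySem.List.pyRange st.1 (st.1 + n) 1).foldl
          (fun (p : PySem.Dict Int String × PySem.Dict Int Int) idx =>
            (p.1.insert idx filename, p.2.insert idx (idx - st.1)))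
          (st.2.1, st.2.2)
        (st.1 + n, inner.1, inner.2))
      (c, d1, d2)
    = ((pvGo metadata fs c).2.2,
       (pvGo metadata fs c).1.foldl (fun d p => d.insert p.1 p.2) d1,
       (pvGo metadata fs c).2.1.foldl (fun d p => d.insert p.1 p.2) d2) := by
  induction fs generalizing c d1 d2 with
  | nil => simp [pvGo]
  | cons f fs ih =>
    simp only [List.foldl, pvGo]
    rw [pv_inner_split, ih, List.foldl_append, List.foldl_append, pv_seg1_fold, pv_seg2_fold]

-- ===== VERDICT (by name: the statement is the Claim_ definition above) =====
theorem create_index_lookup_spec : Claim_equal_create_index_lookup := by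
  intro metadata _ _
  unfold Spec_create_index_lookup create_index_lookup create_index_lookup_alt
  simp only []
  rw [pv_loop]
  rfl
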